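-- pv_equiv track=rewrite | github.com/XKimYXRe/Algorithms-and-its-elements | Character counter.py | analyser_phrase
-- ===== SOURCE A (Python) =====
-- def analyser_phrase(phrase):
--     longueur = 0
--     nombre_mots = 0
--     nombre_voyelles = 0
--     voyelles = "aeiouAEIOU"
--
--     mot_en_cours = False
--
--     for caractere in phrase:
--         longueur += 1
--
--         if caractere in voyelles:
--             nombre_voyelles += 1
--
--         if caractere == ' ':
--             if mot_en_cours:
--                 nombre_mots += 1
--                 mot_en_cours = False
--         elif caractere == '.':
--             if mot_en_cours:
--                 nombre_mots += 1
--             break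
--         else:
--             mot_en_cours = True
--
--     return longueur, nombre_mots, nombre_voyelles
-- ===== SOURCE B (Python) =====
-- def analyser_phrase(phrase):
--     i = phrase.find('.')
--     s = phrase if i == -1 else phrase[:i+1]
--     voyelles = "aeiouAEIOU"
--     nombre_mots = sum(1 for a, b in zip(s, s[1:]) if a not in ' .' and b in ' .')
--     nombre_voyelles = sum(1 for c in s if c in voyelles)
--     return len(s), nombre_mots, nombre_voyelles
-- ===== Notes on version B (the rewrite author's own statement) =====
-- stated objective: alternative
-- what changed: Replaces A's single stateful scan (length/word-in-progress flag/vowel counters with a break at '.') by a find-then-slice decomposition: locate the first period, cut the scanned prefix once, then compute length directly, vowels by a comprehension, and words by counting adjacent pairs (non-separator followed by separator) over zip(s, s[1:]).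
import Mathlib
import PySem

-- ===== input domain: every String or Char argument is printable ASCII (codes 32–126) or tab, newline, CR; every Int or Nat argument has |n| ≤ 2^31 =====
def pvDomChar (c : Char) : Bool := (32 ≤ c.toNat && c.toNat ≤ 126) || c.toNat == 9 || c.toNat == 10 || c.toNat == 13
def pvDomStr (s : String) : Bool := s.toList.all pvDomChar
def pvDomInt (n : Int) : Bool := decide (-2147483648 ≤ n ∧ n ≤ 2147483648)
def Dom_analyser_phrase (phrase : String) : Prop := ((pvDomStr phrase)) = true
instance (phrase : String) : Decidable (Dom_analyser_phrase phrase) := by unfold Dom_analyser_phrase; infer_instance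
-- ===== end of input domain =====

-- B replaces A's single stateful scan (counters + word-in-progress flag + break at '.') by a
-- find/slice-once decomposition with three independent counts (words = adjacent-pair count);
-- objective: alternative decomposition, same O(n) cost.

-- ===== PORT A =====
-- voyelles = "aeiouAEIOU"
def pvVoyelles : List Char := "aeiouAEIOU".toList

-- A's for-loop: state (longueur, nombre_mots, nombre_voyelles, mot_en_cours), break at '.'
def pvLoopA : List Char → Int → Int → Int → Bool → Int × Int × Int
  | [], longueur, mots, voy, _ => (longueur, mots, voy)
  | c :: rest, longueur, mots, voy, enCours =>
    let longueur' := longueur + 1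
    let voy' := if c ∈ pvVoyelles then voy + 1 else voy
    if c = ' ' then
      pvLoopA rest longueur' (if enCours then mots + 1 else mots) voy' false
    else if c = '.' then
      (longueur', (if enCours then mots + 1 else mots), voy')
    else
      pvLoopA rest longueur' mots voy' true

def analyser_phrase (phrase : String) : Int × Int × Int :=
  pvLoopA phrase.toList 0 0 0 false

-- ===== PORT B =====
def analyser_phrase_alt (phrase : String) : Int × Int × Int :=
  let i := PySem.Str.find phrase "."
  let s := if i = -1 then phrase else PySem.Str.slice phrase none (some (i + 1))
  let cs := s.toList
  -- sum(1 for a, b in zip(s, s[1:]) if a not in ' .' and b in ' .')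
  let mots : Int := ((cs.zip (PySem.List.slice cs (some 1) none)).map
      (fun p => if ¬ (p.1 = ' ' ∨ p.1 = '.') ∧ (p.2 = ' ' ∨ p.2 = '.') then (1 : Int) else 0)).sum
  -- sum(1 for c in s if c in voyelles)
  let voy : Int := (cs.map (fun c => if c ∈ pvVoyelles then (1 : Int) else 0)).sum
  (PySem.Str.len s, mots, voy)

-- ===== PRECONDITION & SPEC =====
def Spec_analyser_phrase (phrase : String) (out : Int × Int × Int) : Prop := out = analyser_phrase_alt phrase
instance (phrase : String) (out : Int × Int × Int) : Decidable (Spec_analyser_phrase phrase out) := by unfold Spec_analyser_phrase; infer_instance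

-- ===== CLAIM (what is proved, stated in full; the proofs are below) =====
def Claim_equal_analyser_phrase : Prop := ∀ (phrase : String), Dom_analyser_phrase phrase → Spec_analyser_phrase phrase (analyser_phrase phrase)

-- ===== LEMMAS AND PROOFS =====

-- the prefix A actually scans: everything up to and including the first '.'
def pvScan : List Char → List Char
  | [] => []
  | c :: rest => c :: (if c = '.' then [] else pvScan rest)

-- does the list start with a separator (' ' or '.')?
def pvHeadTerm : List Char → Bool
  | [] => false
  | c :: _ => c = ' ' || c = '.'

-- B's adjacent-pair word count, stated on a plain tail
def pvPC (xs : List Char) : Int :=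
  ((xs.zip xs.tail).map
      (fun p => if ¬ (p.1 = ' ' ∨ p.1 = '.') ∧ (p.2 = ' ' ∨ p.2 = '.') then (1 : Int) else 0)).sum

theorem pvPC_cons (a : Char) (xs : List Char) :
    pvPC (a :: xs) =
      (if ¬ (a = ' ' ∨ a = '.') ∧ pvHeadTerm xs = true then 1 else 0) + pvPC xs := by
  cases xs with
  | nil => simp [pvPC, pvHeadTerm]
  | cons b t =>
    simp only [pvPC, pvHeadTerm, List.tail_cons, List.zip_cons_cons, List.map_cons, List.sum_cons]
    simp

theorem pvHeadTerm_scan (cs : List Char) : pvHeadTerm (pvScan cs) = pvHeadTerm cs := by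
  cases cs with
  | nil => rfl
  | cons c t => simp only [pvScan, pvHeadTerm]

-- characterisation of A's loop by the scanned prefix
theorem pvLoopA_eq (cs : List Char) : ∀ (l m v : Int) (w : Bool),
    pvLoopA cs l m v w =
      (l + ((pvScan cs).length : Int),
       m + (if w = true ∧ pvHeadTerm cs = true then 1 else 0) + pvPC (pvScan cs),
       v + ((pvScan cs).map (fun c => if c ∈ pvVoyelles then (1 : Int) else 0)).sum) := by
  induction cs with
  | nil => intro l m v w; simp [pvLoopA, pvScan, pvHeadTerm, pvPC]
  | cons c t ih =>
    intro l m v w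
    by_cases hdot : c = '.'
    · rw [pvLoopA, if_neg (by rw [hdot]; decide), if_pos hdot]
      rw [pvScan, if_pos hdot, pvPC_cons]
      simp only [pvHeadTerm, pvPC, hdot, List.map_nil, List.sum_nil,
        List.map_cons, List.sum_cons, List.length_cons, List.length_nil]
      refine Prod.ext (by push_cast; ring) (Prod.ext ?_ (by simp; split_ifs <;> ring))
      cases w <;> simp
    · by_cases hsp : c = ' '
      · rw [pvLoopA, if_pos hsp, ih]
        rw [pvScan, if_neg hdot, pvPC_cons, pvHeadTerm_scan]
        simp only [pvHeadTerm, hsp, List.map_cons, List.sum_cons, List.length_cons]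
        refine Prod.ext (by push_cast; ring) (Prod.ext ?_ (by simp; split_ifs <;> ring))
        cases w <;> simp
      · rw [pvLoopA, if_neg hsp, if_neg hdot, ih]
        rw [pvScan, if_neg hdot, pvPC_cons, pvHeadTerm_scan]
        simp only [pvHeadTerm, hsp, hdot, List.map_cons, List.sum_cons, List.length_cons]
        refine Prod.ext (by push_cast; ring) (Prod.ext ?_ (by simp; split_ifs <;> ring))
        cases w <;> simp <;> split_ifs <;> simp_all <;> ring

theorem pvScan_of_no_dot (cs : List Char) (h : '.' ∉ cs) : pvScan cs = cs := by
  induction cs with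
  | nil => rfl
  | cons c t ih =>
    simp only [List.mem_cons, not_or] at h
    rw [pvScan, if_neg (fun hc => h.1 hc.symm), ih h.2]

theorem pvScan_of_dot_at (cs : List Char) : ∀ (n : Nat),
    (∀ i < n, ¬ ['.'] <+: cs.drop i) → ['.'] <+: cs.drop n →
    cs.take (n + 1) = pvScan cs := by
  induction cs with
  | nil => intro n _ hp; obtain ⟨u, hu⟩ := hp; simp at hu
  | cons c t ih =>
    intro n hmin hp
    cases n with
    | zero =>
      simp only [List.drop_zero] at hp
      obtain ⟨u, hu⟩ := hp
      simp only [List.singleton_append, List.cons.injEq] at hu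
      rw [← hu.1]
      simp [pvScan]
    | succ k =>
      have hc : c ≠ '.' := fun hc => hmin 0 (by omega) ⟨t, by simp [hc]⟩
      simp only [List.drop_succ_cons] at hp
      simp only [List.take_succ_cons]
      rw [pvScan, if_neg hc, ih k (fun i hi => by
        have := hmin (i + 1) (by omega)
        simpa using this) hp]

-- B's cut string is exactly A's scanned prefix
theorem pvAlt_toList (phrase : String) :
    (if PySem.Str.find phrase "." = -1 then phrase
      else PySem.Str.slice phrase none (some (PySem.Str.find phrase "." + 1))).toList
      = pvScan phrase.toList := by
  by_cases hfind : PySem.Str.find phrase "." = -1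
  · rw [if_pos hfind, pvScan_of_no_dot]
    have := (PySem.Str.find_eq_neg_one_iff phrase ".").mp hfind
    simpa [List.singleton_infix_iff] using this
  · rw [if_neg hfind]
    have hnn : 0 ≤ PySem.Str.find phrase "." := by
      have h := PySem.Chars.neg_one_le_find phrase.toList ".".toList
      simp only [PySem.Str.find_eq] at hfind ⊢
      omega
    have hspec := PySem.Chars.find_spec (s := phrase.toList) (sub := ".".toList)
      (by simpa [PySem.Str.find_eq] using hnn)
    have htake : phrase.toList.take ((PySem.Str.find phrase ".").toNat + 1) = pvScan phrase.toList := by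
      apply pvScan_of_dot_at
      · intro i hi
        simpa [PySem.Str.find_eq] using hspec.2 i (by simpa [PySem.Str.find_eq] using hi)
      · simpa [PySem.Str.find_eq] using hspec.1
    have htn : (PySem.Str.find phrase "." + 1).toNat = (PySem.Str.find phrase ".").toNat + 1 := by omega
    simp only [PySem.Str.toList_slice, PySem.Chars.slice_eq_listSlice]
    rw [PySem.List.slice_to _ (by omega), htn, htake]

-- ===== VERDICT (by name: the statement is the Claim_ definition above) =====
theorem analyser_phrase_spec : Claim_equal_analyser_phrase := by
  intro phrase _
  unfold Spec_analyser_phrase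
  simp only [analyser_phrase, analyser_phrase_alt]
  rw [pvLoopA_eq, PySem.Str.len_eq, pvAlt_toList, PySem.List.slice_from_one]
  simp [pvPC]
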